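-- pv_equiv track=rewrite | github.com/RohanSavani/PVN_GLP1R | photometry_preprocessing.py | calculate_meals
-- ===== SOURCE A (Python) =====
-- def calculate_meals(eating, max_time_apart=180, min_events=3):
--     #Calculate meal onsets and offsets from eating events
--     #Max time apart (int): maximum time in seconds between each individual eating event
--     #Min events (int): minimum number of eating events to be considered a meal
--     meal_onset = []
--     meal_offset = []
--     for i in range(len(eating)-1):
--         if not any(eating[i] <= meal for meal in meal_offset):
--             if eating[i+1] - eating[i] < max_time_apart:
--                 counter = 0
--                 for j in range(len(eating)-i):
--                     try:
--                         if eating[i+j+1] - eating[i+j] < max_time_apart: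
--                             counter += 1
--                         else:
--                             break
--                     except IndexError:
--                         break
--
--                 if counter > min_events:
--                     meal_onset.append(eating[i])
--                     meal_offset.append(eating[i+counter])
--
--     return meal_onset, meal_offset
-- ===== SOURCE B (Python) =====
-- def calculate_meals(eating, max_time_apart=180, min_events=3):
--     # One pass: precompute run lengths of close-gap chains back-to-front,
--     # and track the running max of recorded meal offsets instead of scanning.
--     n = len(eating)
--     run = [0] * n  # run[i] = number of consecutive gaps < max_time_apart starting at gap i
--     for i in range(n - 2, -1, -1):
--         if eating[i + 1] - eating[i] < max_time_apart:
--             run[i] = run[i + 1] + 1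
--     meal_onset = []
--     meal_offset = []
--     last = None  # max of meal_offset so far
--     for i in range(n - 1):
--         if (last is None or eating[i] > last) and run[i] > 0:
--             c = run[i]
--             if c > min_events:
--                 meal_onset.append(eating[i])
--                 off = eating[i + c]
--                 meal_offset.append(off)
--                 last = off if last is None else max(last, off)
--     return meal_onset, meal_offset
-- ===== Notes on version B (the rewrite author's own statement) =====
-- stated objective: faster
-- what changed: B precomputes all gap-run lengths in one backward pass and tracks the running maximum of recorded meal offsets in a variable, replacing A's per-index any()-scan over the offset list and per-index re-counting of the run.
import Mathlib
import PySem

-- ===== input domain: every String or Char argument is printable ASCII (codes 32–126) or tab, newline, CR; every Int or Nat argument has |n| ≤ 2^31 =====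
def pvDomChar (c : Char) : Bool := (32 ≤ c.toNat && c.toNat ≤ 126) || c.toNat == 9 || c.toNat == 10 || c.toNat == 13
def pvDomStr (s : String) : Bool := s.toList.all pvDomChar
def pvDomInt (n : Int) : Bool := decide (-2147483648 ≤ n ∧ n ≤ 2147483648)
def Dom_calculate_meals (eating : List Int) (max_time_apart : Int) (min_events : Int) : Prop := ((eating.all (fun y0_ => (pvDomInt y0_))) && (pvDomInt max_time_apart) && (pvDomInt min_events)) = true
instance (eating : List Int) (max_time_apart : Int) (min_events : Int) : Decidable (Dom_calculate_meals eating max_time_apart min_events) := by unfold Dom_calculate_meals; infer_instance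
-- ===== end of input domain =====

-- B replaces A's quadratic any()-scan and per-index re-count by one backward
-- precomputation of gap-run lengths plus a running max of recorded offsets (alternative, asymptotically faster algorithm).


-- ===== PORT A =====
-- inner 'for j in range(len(eating)-i)' with break and try/except IndexError:
-- fuel = len(eating)-i, p = i+j, c = counter; pyGet? = none models the IndexError branch (break)
def pvAInner (eating : List Int) (M : Int) : Nat → Int → Int → Int
  | 0, _, c => c
  | fuel+1, p, c =>
    match PySem.List.pyGet? eating (p+1), PySem.List.pyGet? eating p with
    | some a, some b => if a - b < M then pvAInner eating M fuel (p+1) (c+1) else c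
    | _, _ => c

-- outer 'for i in range(len(eating)-1)': fuel counts remaining iterations, k is i
def pvAOuter (eating : List Int) (M minE : Int) : Nat → Nat → List Int × List Int → List Int × List Int
  | 0, _, st => st
  | fuel+1, k, (onset, offset) =>
    let st :=
      if offset.any (fun meal => decide (PySem.List.pyGetD eating (k : Int) 0 ≤ meal)) then
        (onset, offset)
      else if PySem.List.pyGetD eating ((k : Int)+1) 0 - PySem.List.pyGetD eating (k : Int) 0 < M then
        let c := pvAInner eating M (PySem.List.len eating - (k : Int)).toNat (k : Int) 0
        if c > minE then
          (onset ++ [PySem.List.pyGetD eating (k : Int) 0],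
           offset ++ [PySem.List.pyGetD eating ((k : Int) + c) 0])
        else (onset, offset)
      else (onset, offset)
    pvAOuter eating M minE fuel (k+1) st

def calculate_meals (eating : List Int) (max_time_apart : Int) (min_events : Int) : List Int × List Int :=
  pvAOuter eating max_time_apart min_events (PySem.List.len eating - 1).toNat 0 ([], [])

-- ===== PORT B =====
-- backward loop 'for i in range(n-2, -1, -1)': run[i] = run[i+1]+1 if gap i close else 0
def pvRuns (M : Int) : List Int → List Int
  | [] => []
  | [_] => [0]
  | a :: b :: rest =>
    let r := pvRuns M (b :: rest)
    (if b - a < M then r.headD 0 + 1 else 0) :: r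

-- forward loop 'for i in range(n-1)' with running max 'last' of recorded offsets
def pvBLoop (eating run : List Int) (minE : Int) : Nat → Nat → List Int × List Int × Option Int → List Int × List Int
  | 0, _, (onset, offset, _) => (onset, offset)
  | fuel+1, k, (onset, offset, last) =>
    let ei := PySem.List.pyGetD eating (k : Int) 0
    let c := PySem.List.pyGetD run (k : Int) 0
    let st :=
      if ((match last with | none => true | some l => decide (l < ei)) && decide (0 < c)) then
        if minE < c then
          let eo := PySem.List.pyGetD eating ((k : Int) + c) 0
          (onset ++ [ei], offset ++ [eo],
           some (match last with | none => eo | some l => max l eo))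
        else (onset, offset, last)
      else (onset, offset, last)
    pvBLoop eating run minE fuel (k+1) st

def calculate_meals_alt (eating : List Int) (max_time_apart : Int) (min_events : Int) : List Int × List Int :=
  pvBLoop eating (pvRuns max_time_apart eating) min_events (PySem.List.len eating - 1).toNat 0 ([], [], none)

-- ===== PRECONDITION & SPEC =====
def Spec_calculate_meals (eating : List Int) (max_time_apart : Int) (min_events : Int) (out : List Int × List Int) : Prop := out = calculate_meals_alt eating max_time_apart min_events
instance (eating : List Int) (max_time_apart : Int) (min_events : Int) (out : List Int × List Int) : Decidable (Spec_calculate_meals eating max_time_apart min_events out) := by unfold Spec_calculate_meals; infer_instance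

-- ===== CLAIM (what is proved, stated in full; the proofs are below) =====
def Claim_equal_calculate_meals : Prop := ∀ (eating : List Int) (max_time_apart : Int) (min_events : Int), Dom_calculate_meals eating max_time_apart min_events → Spec_calculate_meals eating max_time_apart min_events (calculate_meals eating max_time_apart min_events)

-- ===== LEMMAS AND PROOFS =====
-- one-step unfolding of the inner counter (definitional)
theorem pvAInner_succ (eating : List Int) (M : Int) (fuel : Nat) (p c : Int) :
    pvAInner eating M (fuel+1) p c =
      (match PySem.List.pyGet? eating (p+1), PySem.List.pyGet? eating p with
       | some a, some b => if a - b < M then pvAInner eating M fuel (p+1) (c+1) else c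
       | _, _ => c) := rfl

-- the accumulator of the inner counter is additive
theorem pvAInner_acc (eating : List Int) (M : Int) :
    ∀ (fuel : Nat) (p c : Int), pvAInner eating M fuel p c = pvAInner eating M fuel p 0 + c := by
  intro fuel
  induction fuel with
  | zero => intro p c; simp [pvAInner]
  | succ f ih =>
    intro p c
    simp only [pvAInner]
    cases PySem.List.pyGet? eating (p+1) with
    | none => simp
    | some a =>
      cases PySem.List.pyGet? eating p with
      | none => simp
      | some b =>
        by_cases hlt : a - b < M
        · simp only [if_pos hlt]
          rw [ih (p+1) (c+1), ih (p+1) (0+1)]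
          ring
        · simp [if_neg hlt]

theorem pvAInner_nonneg (eating : List Int) (M : Int) :
    ∀ (fuel : Nat) (p c : Int), c ≤ pvAInner eating M fuel p c := by
  intro fuel
  induction fuel with
  | zero => intro p c; simp [pvAInner]
  | succ f ih =>
    intro p c
    simp only [pvAInner]
    cases PySem.List.pyGet? eating (p+1) with
    | none => simp
    | some a =>
      cases PySem.List.pyGet? eating p with
      | none => simp
      | some b =>
        by_cases hlt : a - b < M
        · simp only [if_pos hlt]
          have := ih (p+1) (c+1)
          omega
        · simp [if_neg hlt]

-- indexing into a cons at p+1 (p ≥ 0) reads the tail at p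
theorem pvGet_cons_shift (a : Int) (l : List Int) (p : Int) (hp : 0 ≤ p) :
    PySem.List.pyGet? (a :: l) (p + 1) = PySem.List.pyGet? l p := by
  rw [PySem.List.pyGet?_of_nonneg _ (by omega : (0:Int) ≤ p + 1),
      PySem.List.pyGet?_of_nonneg _ hp]
  rw [show (p + 1).toNat = p.toNat + 1 by omega]
  simp

-- shift: the counter on a cons at position p+1 equals the counter on the tail at position p
theorem pvAInner_shift (a : Int) (l : List Int) (M : Int) :
    ∀ (fuel : Nat) (p : Int), 0 ≤ p → ∀ (c : Int),
      pvAInner (a :: l) M fuel (p + 1) c = pvAInner l M fuel p c := by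
  intro fuel
  induction fuel with
  | zero => intro p hp c; simp [pvAInner]
  | succ f ih =>
    intro p hp c
    simp only [pvAInner]
    rw [pvGet_cons_shift a l (p+1) (by omega), pvGet_cons_shift a l p hp]
    cases PySem.List.pyGet? l (p + 1) with
    | none => rfl
    | some x =>
      cases PySem.List.pyGet? l p with
      | none => rfl
      | some y =>
        by_cases hlt : x - y < M
        · simp only [if_pos hlt]
          exact ih (p+1) (by omega) (c+1)
        · simp [if_neg hlt]

-- the head of the run list is A's inner counter at index 0
theorem pvRuns_head (M : Int) :
    ∀ (l : List Int), l ≠ [] → (pvRuns M l).headD 0 = pvAInner l M l.length 0 0 := by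
  intro l
  induction l with
  | nil => intro h; exact absurd rfl h
  | cons a t ih =>
    intro _
    cases t with
    | nil =>
      simp only [pvRuns, List.headD_cons, List.length_cons, List.length_nil, Nat.zero_add]
      rw [pvAInner_succ]
      have h1 : PySem.List.pyGet? [a] ((0:Int) + 1) = none := by
        rw [show ((0:Int) + 1) = ((1 : Nat) : Int) by norm_num, PySem.List.pyGet?_natCast]
        simp
      rw [h1]
    | cons b rest =>
      have ihv := ih (by simp)
      simp only [pvRuns, List.headD_cons]
      rw [show (a :: b :: rest).length = (b :: rest).length + 1 from by simp]
      rw [pvAInner_succ]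
      have hg1 : PySem.List.pyGet? (a :: b :: rest) ((0:Int) + 1) = some b := by
        rw [pvGet_cons_shift a (b :: rest) 0 le_rfl]
        exact PySem.List.pyGet?_zero_cons b rest
      rw [hg1, PySem.List.pyGet?_zero_cons]
      by_cases hlt : b - a < M
      · simp only [if_pos hlt]
        rw [pvAInner_shift a (b :: rest) M (b :: rest).length 0 le_rfl (0+1),
            pvAInner_acc, ← ihv]
        ring
      · simp [if_neg hlt]

-- run[k] is A's inner counter at index k
theorem pvRuns_get (M : Int) :
    ∀ (l : List Int) (k : Nat), k < l.length →
      (pvRuns M l).getD k 0 = pvAInner l M (l.length - k) (k : Int) 0 := by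
  intro l
  induction l with
  | nil => intro k h; simp at h
  | cons a t ih =>
    intro k hk
    cases k with
    | zero =>
      rw [show ((a :: t).length - 0) = (a :: t).length by omega,
          show ((0 : Nat) : Int) = (0 : Int) by norm_num,
          ← pvRuns_head M (a :: t) (by simp)]
      cases pvRuns M (a :: t) with
      | nil => simp
      | cons x xs => simp
    | succ k =>
      cases t with
      | nil => simp at hk
      | cons b rest =>
        simp only [pvRuns, List.getD_cons_succ]
        have hk' : k < (b :: rest).length := by simp at hk ⊢; omega
        rw [ih k hk']
        rw [show ((k+1 : Nat) : Int) = ((k : Nat) : Int) + 1 by push_cast; ring]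
        rw [show ((a :: b :: rest).length - (k+1)) = ((b :: rest).length - k) by simp only [List.length_cons]; omega]
        rw [pvAInner_shift a (b :: rest) M ((b :: rest).length - k) k (Int.natCast_nonneg k) 0]

-- invariant tying B's running max 'last' to A's offset list: the any()-scan equals a compare with last
def pvInv (off : List Int) (last : Option Int) : Prop :=
  ∀ x : Int, off.any (fun m => decide (x ≤ m)) = (match last with | none => false | some l => decide (x ≤ l))

theorem pvInv_nil : pvInv [] none := by intro x; simp

theorem pvInv_append_none (off : List Int) (e : Int) (h : pvInv off none) :
    pvInv (off ++ [e]) (some e) := by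
  intro x
  have hx : (off.any fun m => decide (x ≤ m)) = false := h x
  simp only [List.any_append, hx, List.any_cons, List.any_nil, Bool.or_false, Bool.false_or]

theorem pvInv_append_some (off : List Int) (l e : Int) (h : pvInv off (some l)) :
    pvInv (off ++ [e]) (some (max l e)) := by
  intro x
  have hx : (off.any fun m => decide (x ≤ m)) = decide (x ≤ l) := h x
  simp only [List.any_append, hx, List.any_cons, List.any_nil, Bool.or_false]
  by_cases h1 : x ≤ max l e
  · rw [decide_eq_true h1]
    rcases le_max_iff.mp h1 with h2 | h2 <;> simp [decide_eq_true h2]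
  · rw [decide_eq_false h1,
        decide_eq_false (fun hh => h1 (le_max_of_le_left hh)),
        decide_eq_false (fun hh => h1 (le_max_of_le_right hh))]
    rfl

-- one matched step of the two loops, then induction on the remaining fuel
theorem pvMain (eating : List Int) (M minE : Int) :
    ∀ (fuel k : Nat) (onset off : List Int) (last : Option Int),
      pvInv off last → k + fuel ≤ eating.length - 1 →
      pvAOuter eating M minE fuel k (onset, off) =
        pvBLoop eating (pvRuns M eating) minE fuel k (onset, off, last) := by
  intro fuel
  induction fuel with
  | zero => intro k onset off last _ _; simp [pvAOuter, pvBLoop]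
  | succ f ih =>
    intro k onset off last hinv hb
    have hk1 : k + 1 < eating.length := by omega
    have hk : k < eating.length := by omega
    simp only [pvAOuter, pvBLoop]
    have hei : PySem.List.pyGetD eating (k : Int) 0 = eating[k] := by
      rw [PySem.List.pyGetD_natCast]; exact List.getD_eq_getElem eating 0 hk
    have hei1 : PySem.List.pyGetD eating ((k : Int) + 1) 0 = eating[k+1] := by
      rw [show ((k : Int) + 1) = ((k+1 : Nat) : Int) by push_cast; ring,
          PySem.List.pyGetD_natCast]
      exact List.getD_eq_getElem eating 0 hk1
    have hfuel : (PySem.List.len eating - (k : Int)).toNat = eating.length - k := by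
      rw [PySem.List.len_eq]; omega
    have hrun : PySem.List.pyGetD (pvRuns M eating) (k : Int) 0 =
        pvAInner eating M (eating.length - k) (k : Int) 0 := by
      rw [PySem.List.pyGetD_natCast]
      exact pvRuns_get M eating k hk
    set c := pvAInner eating M (eating.length - k) (k : Int) 0 with hc
    have hunf : c = (if eating[k+1] - eating[k] < M
        then pvAInner eating M (eating.length - k - 1) ((k : Int)+1) (0+1) else 0) := by
      have hg1 : PySem.List.pyGet? eating ((k:Int)+1) = some eating[k+1] := by
        rw [show ((k:Int)+1) = ((k+1:Nat):Int) by push_cast; ring, PySem.List.pyGet?_natCast,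
            List.getElem?_eq_getElem hk1]
      have hg0 : PySem.List.pyGet? eating (k:Int) = some eating[k] := by
        rw [PySem.List.pyGet?_natCast, List.getElem?_eq_getElem hk]
      rw [hc]
      conv_lhs => rw [show eating.length - k = (eating.length - k - 1) + 1 by omega,
        pvAInner_succ]
      rw [hg1, hg0]
    rw [hrun, hfuel, ← hc, hei1, hei]
    cases last with
    | none =>
      have hany : (off.any fun meal => decide (eating[k] ≤ meal)) = false := hinv eating[k]
      rw [hany, if_neg (by simp)]
      simp only [Bool.true_and, decide_eq_true_eq, gt_iff_lt]
      by_cases hgap : eating[k+1] - eating[k] < M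
      · have hcpos : 0 < c := by
          rw [hunf, if_pos hgap]
          have := pvAInner_nonneg eating M (eating.length - k - 1) ((k : Int)+1) (0+1)
          omega
        rw [if_pos hgap, if_pos hcpos]
        by_cases hmin : minE < c
        · rw [if_pos hmin, if_pos hmin]
          exact ih (k+1) _ _ _ (pvInv_append_none off _ hinv) (by omega)
        · rw [if_neg hmin, if_neg hmin]
          exact ih (k+1) _ _ _ hinv (by omega)
      · have hczero : c = 0 := by rw [hunf, if_neg hgap]
        rw [if_neg hgap, hczero, if_neg (lt_irrefl 0)]
        exact ih (k+1) _ _ _ hinv (by omega)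
    | some l =>
      have hany : (off.any fun meal => decide (eating[k] ≤ meal)) = decide (eating[k] ≤ l) :=
        hinv eating[k]
      rw [hany]
      simp only [decide_eq_true_eq, Bool.and_eq_true, gt_iff_lt]
      by_cases hdom : eating[k] ≤ l
      · -- an earlier recorded offset dominates: both sides skip
        rw [if_pos hdom, if_neg (fun h => absurd h.1 (by omega))]
        exact ih (k+1) _ _ _ hinv (by omega)
      · rw [if_neg hdom]
        by_cases hgap : eating[k+1] - eating[k] < M
        · have hcpos : 0 < c := by
            rw [hunf, if_pos hgap]
            have := pvAInner_nonneg eating M (eating.length - k - 1) ((k : Int)+1) (0+1)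
            omega
          rw [if_pos hgap, if_pos (And.intro (by omega) hcpos)]
          by_cases hmin : minE < c
          · rw [if_pos hmin, if_pos hmin]
            exact ih (k+1) _ _ _ (pvInv_append_some off l _ hinv) (by omega)
          · rw [if_neg hmin, if_neg hmin]
            exact ih (k+1) _ _ _ hinv (by omega)
        · have hczero : c = 0 := by rw [hunf, if_neg hgap]
          rw [if_neg hgap, hczero, if_neg (fun h => absurd h.2 (lt_irrefl 0))]
          exact ih (k+1) _ _ _ hinv (by omega)

-- ===== VERDICT (by name: the statement is the Claim_ definition above) =====
theorem calculate_meals_spec : Claim_equal_calculate_meals := by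
  intro eating M minE _
  unfold Spec_calculate_meals calculate_meals calculate_meals_alt
  rw [show (PySem.List.len eating - 1).toNat = eating.length - 1 by
    rw [PySem.List.len_eq]; omega]
  exact pvMain eating M minE (eating.length - 1) 0 [] [] none pvInv_nil (by omega)
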